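-- pv_equiv track=rewrite | github.com/jitenkr2030/Brain-AI-Framework | brain_ai/examples/learning-platform/app.py | _analyze_difficulty_progression
-- ===== SOURCE A (Python) =====
-- from typing import List, Dict, Any, Optional
--
-- def _analyze_difficulty_progression(complexity_levels: List[str]) -> str:
--     """Analyze the difficulty progression pattern"""
--     complexity_order = {"simple": 1, "intermediate": 2, "advanced": 3}
--
--     progression_scores = [complexity_order.get(level, 2) for level in complexity_levels]
--
--     if progression_scores == sorted(progression_scores):
--         return "increasing"
--     elif progression_scores == sorted(progression_scores, reverse=True):
--         return "decreasing"
--     else: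
--         return "mixed"
-- ===== SOURCE B (Python) =====
-- def _analyze_difficulty_progression(complexity_levels):
--     """Analyze the difficulty progression pattern (single linear pass)."""
--     complexity_order = {"simple": 1, "intermediate": 2, "advanced": 3}
--     non_decreasing = True
--     non_increasing = True
--     prev = None
--     for level in complexity_levels:
--         score = complexity_order.get(level, 2)
--         if prev is not None:
--             if score < prev:
--                 non_decreasing = False
--             if score > prev:
--                 non_increasing = False
--         prev = score
--     if non_decreasing:
--         return "increasing"
--     if non_increasing:
--         return "decreasing"
--     return "mixed"
-- ===== Notes on version B (the rewrite author's own statement) =====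
-- stated objective: alternative
-- what changed: Replaces the two sort-and-compare passes with a single linear pass that tracks non-decreasing/non-increasing flags, keeping A's tie-break (constant lists are 'increasing'); O(n) vs O(n log n) asymptotically, but not measurably faster in CPython where sort runs in C.
import Mathlib
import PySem

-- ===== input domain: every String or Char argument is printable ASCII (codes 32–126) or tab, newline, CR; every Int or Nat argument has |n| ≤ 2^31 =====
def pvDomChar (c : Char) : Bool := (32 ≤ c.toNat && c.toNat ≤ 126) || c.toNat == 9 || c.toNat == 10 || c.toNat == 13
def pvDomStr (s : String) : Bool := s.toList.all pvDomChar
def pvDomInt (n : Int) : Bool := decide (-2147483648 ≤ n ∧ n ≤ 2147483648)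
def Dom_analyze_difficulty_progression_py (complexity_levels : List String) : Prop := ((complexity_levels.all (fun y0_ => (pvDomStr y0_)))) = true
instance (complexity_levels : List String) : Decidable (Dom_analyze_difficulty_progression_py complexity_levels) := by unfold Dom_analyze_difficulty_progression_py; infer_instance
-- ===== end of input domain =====

-- B replaces A's two sort-and-compare passes with one linear pass tracking
-- non-decreasing / non-increasing flags (same result, including the tie-break
-- that a constant list is "increasing").


-- ===== PORT A =====
-- complexity_order = {"simple": 1, "intermediate": 2, "advanced": 3} (shared by both Pythons)
def pvComplexityOrder : PySem.Dict String Int :=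
  (((PySem.Dict.empty).insert "simple" 1).insert "intermediate" 2).insert "advanced" 3

def analyze_difficulty_progression_py (complexity_levels : List String) : String :=
  let progression_scores := complexity_levels.map (fun level => pvComplexityOrder.getD level 2)
  if progression_scores = PySem.List.sorted progression_scores (fun x => x) false then
    "increasing"
  else if progression_scores = PySem.List.sorted progression_scores (fun x => x) true then
    "decreasing"
  else
    "mixed"

-- ===== PORT B =====
-- loop state: (non_decreasing, non_increasing, prev)
def pvStep (st : Bool × Bool × Option Int) (level : String) : Bool × Bool × Option Int :=
  let score := pvComplexityOrder.getD level 2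
  match st with
  | (nd, ni, none) => (nd, ni, some score)
  | (nd, ni, some p) =>
      (nd && !(decide (score < p)), ni && !(decide (p < score)), some score)

def analyze_difficulty_progression_py_alt (complexity_levels : List String) : String :=
  let st := complexity_levels.foldl pvStep (true, true, none)
  if st.1 then "increasing"
  else if st.2.1 then "decreasing"
  else "mixed"

-- ===== PRECONDITION & SPEC =====
def Spec_analyze_difficulty_progression_py (complexity_levels : List String) (out : String) : Prop := out = analyze_difficulty_progression_py_alt complexity_levels
instance (complexity_levels : List String) (out : String) : Decidable (Spec_analyze_difficulty_progression_py complexity_levels out) := by unfold Spec_analyze_difficulty_progression_py; infer_instance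

-- ===== CLAIM (what is proved, stated in full; the proofs are below) =====
def Claim_equal_analyze_difficulty_progression_py : Prop := ∀ (complexity_levels : List String), Dom_analyze_difficulty_progression_py complexity_levels → Spec_analyze_difficulty_progression_py complexity_levels (analyze_difficulty_progression_py complexity_levels)

-- ===== LEMMAS AND PROOFS =====

theorem pv_not_decide_lt (a b : Int) : (!decide (a < b)) = decide (b ≤ a) := by
  rw [← decide_not]
  exact decide_eq_decide.mpr not_lt

-- A's conditions, characterised as chains
theorem eq_sorted_iff_chain (s : List Int) :
    s = PySem.List.sorted s (fun x => x) false ↔ List.IsChain (· ≤ ·) s := by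
  constructor
  · intro h
    rw [List.isChain_iff_pairwise]
    have := PySem.List.sorted_pairwise (xs := s) (key := fun x => x) (κ := Int)
    rwa [← h] at this
  · intro h
    rw [List.isChain_iff_pairwise] at h
    exact (PySem.List.sorted_eq_self_of_pairwise (xs := s) (key := fun x => x) h).symm

theorem eq_sorted_rev_iff_chain (s : List Int) :
    s = PySem.List.sorted s (fun x => x) true ↔ List.IsChain (fun a b => b ≤ a) s := by
  constructor
  · intro h
    rw [List.isChain_iff_pairwise]
    have := PySem.List.sorted_pairwise_rev (xs := s) (key := fun x => x) (κ := Int)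
    rwa [← h] at this
  · intro h
    rw [List.isChain_iff_pairwise] at h
    exact (PySem.List.sorted_rev_eq_self_of_pairwise (xs := s) (key := fun x => x) h).symm

-- B's loop invariant: flags record chain properties of prev :: rest of scores
theorem foldl_pvStep_some (l : List String) :
    ∀ (nd ni : Bool) (p : Int),
      (l.foldl pvStep (nd, ni, some p)).1
        = (nd && decide (List.IsChain (· ≤ ·) (p :: l.map (fun x => pvComplexityOrder.getD x 2)))) ∧
      (l.foldl pvStep (nd, ni, some p)).2.1
        = (ni && decide (List.IsChain (fun a b => b ≤ a) (p :: l.map (fun x => pvComplexityOrder.getD x 2)))) := by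
  induction l with
  | nil => intro nd ni p; simp [List.foldl]
  | cons x t ih =>
      intro nd ni p
      have h := ih (nd && !(decide (pvComplexityOrder.getD x 2 < p)))
                   (ni && !(decide (p < pvComplexityOrder.getD x 2)))
                   (pvComplexityOrder.getD x 2)
      simp only [List.foldl, pvStep, List.map] at h ⊢
      rcases h with ⟨h1, h2⟩
      rw [h1, h2]
      constructor
      · simp [List.isChain_cons_cons, Bool.and_assoc, pv_not_decide_lt]
      · simp [List.isChain_cons_cons, Bool.and_assoc, pv_not_decide_lt]

-- ===== VERDICT (by name: the statement is the Claim_ definition above) =====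
theorem analyze_difficulty_progression_py_spec : Claim_equal_analyze_difficulty_progression_py := by
  intro cl _
  unfold Spec_analyze_difficulty_progression_py
  unfold analyze_difficulty_progression_py analyze_difficulty_progression_py_alt
  cases cl with
  | nil => decide
  | cons x t =>
      simp only [List.foldl, pvStep, List.map]
      obtain ⟨h1, h2⟩ := foldl_pvStep_some t true true (pvComplexityOrder.getD x 2)
      by_cases hinc : List.IsChain (· ≤ ·) ((pvComplexityOrder.getD x 2) :: t.map (fun y => pvComplexityOrder.getD y 2))
      · rw [if_pos ((eq_sorted_iff_chain _).mpr hinc)]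
        simp [h1, hinc]
      · rw [if_neg (fun h => hinc ((eq_sorted_iff_chain _).mp h))]
        by_cases hdec : List.IsChain (fun a b => b ≤ a) ((pvComplexityOrder.getD x 2) :: t.map (fun y => pvComplexityOrder.getD y 2))
        · rw [if_pos ((eq_sorted_rev_iff_chain _).mpr hdec)]
          simp [h1, h2, hinc, hdec]
        · rw [if_neg (fun h => hdec ((eq_sorted_rev_iff_chain _).mp h))]
          simp [h1, h2, hinc, hdec]
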